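-- pv_equiv track=rewrite | github.com/teymuri/milton | src/akkord/utils.py | _str_grp_items
-- ===== SOURCE A (Python) =====
-- def get_onset(x): return x["onset"]
--
-- def get_dur(nt): return nt["dur"]
--
-- def _str_grp_items(grp):
--     sort_grp = sorted(grp, key=get_dur)
--     dur_cps = [get_dur(x) for x in sort_grp]
--     _str = [sort_grp.pop(0)]
--     i = 1
--     while sort_grp:
--         item = sort_grp.pop(0).copy()
--         last_item = _str[-1]
--         item["onset"] = get_onset(last_item) + get_dur(last_item)
--         item["dur"] = dur_cps[i] - dur_cps[i-1] # dur of item is bigger than dur of last item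
--         _str.append(item)
--         i += 1
--     return _str
-- ===== SOURCE B (Python) =====
-- def get_onset(x): return x["onset"]
--
-- def get_dur(nt): return nt["dur"]
--
-- def _str_grp_items(grp):
--     sort_grp = sorted(grp, key=get_dur)
--     dur_cps = [get_dur(x) for x in sort_grp]
--     first = sort_grp[0]
--     if len(sort_grp) == 1:
--         return [first]
--     base = get_onset(first)
--     return [first] + [
--         {**item, "onset": base + pd, "dur": d - pd}
--         for pd, d, item in zip(dur_cps, dur_cps[1:], sort_grp[1:])
--     ]
-- ===== Notes on version B (the rewrite author's own statement) =====
-- stated objective: simpler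
-- what changed: B removes A's running last_item accumulator and pop loop: since the onset chain telescopes, each later item is built independently from the first item's onset and adjacent sorted durations via a zip comprehension.
import Mathlib
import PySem

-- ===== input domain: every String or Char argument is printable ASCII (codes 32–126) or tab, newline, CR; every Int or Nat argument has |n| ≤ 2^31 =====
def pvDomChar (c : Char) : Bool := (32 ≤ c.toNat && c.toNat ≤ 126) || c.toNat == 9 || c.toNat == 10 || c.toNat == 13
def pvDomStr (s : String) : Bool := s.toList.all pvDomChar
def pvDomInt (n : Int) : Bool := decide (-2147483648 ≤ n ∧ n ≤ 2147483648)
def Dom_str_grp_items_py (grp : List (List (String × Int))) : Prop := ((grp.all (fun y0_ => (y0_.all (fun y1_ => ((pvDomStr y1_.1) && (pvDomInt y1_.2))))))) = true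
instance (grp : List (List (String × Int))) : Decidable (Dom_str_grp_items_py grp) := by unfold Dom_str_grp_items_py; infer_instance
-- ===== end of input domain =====

-- B drops A's running last_item accumulator: the onset chain telescopes, so each later item is
-- built independently from the first item's onset and adjacent sorted durations via zip (objective: simpler).

-- ===== PORT A =====
def pvGetOnset (d : PySem.Dict String Int) : Int := PySem.Dict.getD d "onset" 0   -- x["onset"]; Pre_ excludes the KeyError inputs
def pvGetDur (d : PySem.Dict String Int) : Int := PySem.Dict.getD d "dur" 0       -- nt["dur"]; Pre_ excludes the KeyError inputs

-- the while loop: _str kept reversed (head = _str[-1]), i is A's counter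
def pvAux (cps : List Int) : List (PySem.Dict String Int) → List (PySem.Dict String Int) → Nat → List (PySem.Dict String Int)
  | [], str, _ => str.reverse
  | item :: rest, str, i =>
      let last := str.headD PySem.Dict.empty
      let it := PySem.Dict.insert (PySem.Dict.insert item "onset" (pvGetOnset last + pvGetDur last)) "dur" (cps.getD i 0 - cps.getD (i-1) 0)
      pvAux cps rest (it :: str) (i+1)

def str_grp_items_py (grp : List (List (String × Int))) : List (List (String × Int)) :=
  let sort_grp := PySem.List.sorted (grp.map PySem.Dict.ofList) pvGetDur
  let dur_cps := sort_grp.map pvGetDur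
  match sort_grp with
  | [] => []                    -- Python raises IndexError here (excluded by Pre_)
  | first :: rest => (pvAux dur_cps rest [first] 1).map PySem.Dict.items

-- ===== PORT B =====
def str_grp_items_py_alt (grp : List (List (String × Int))) : List (List (String × Int)) :=
  let sort_grp := PySem.List.sorted (grp.map PySem.Dict.ofList) pvGetDur
  let dur_cps := sort_grp.map pvGetDur
  match sort_grp with
  | [] => []                    -- Python raises IndexError here (excluded by Pre_)
  | first :: rest =>
      if rest.isEmpty then [first.items]
      else
        let base := pvGetOnset first
        (first :: (dur_cps.zip ((PySem.List.slice dur_cps (some 1) none).zip rest)).map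
            (fun p => PySem.Dict.insert (PySem.Dict.insert p.2.2 "onset" (base + p.1)) "dur" (p.2.1 - p.1))).map PySem.Dict.items

-- ===== PRECONDITION & SPEC =====
-- Pre_ excludes exactly the inputs where Python A raises: the empty list (IndexError), an item
-- without a "dur" key (KeyError in the sort key), and, when there is more than one item, a
-- duration-minimal first sorted item without an "onset" key (KeyError on get_onset).
def Pre_str_grp_items_py (grp : List (List (String × Int))) : Prop :=
  grp ≠ [] ∧ (∀ item ∈ grp, (PySem.Dict.ofList item).contains "dur" = true) ∧
    (grp.length ≤ 1 ∨
      (((PySem.List.sorted (grp.map PySem.Dict.ofList) pvGetDur).headD PySem.Dict.empty).contains "onset" = true))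
instance (grp : List (List (String × Int))) : Decidable (Pre_str_grp_items_py grp) := by unfold Pre_str_grp_items_py; infer_instance

def pvWitness_str_grp_items_py : (List (List (String × Int))) :=
  [[("dur", 2), ("onset", 0)], [("dur", 1), ("onset", 5)], [("dur", 4)]]

def Spec_str_grp_items_py (grp : List (List (String × Int))) (out : List (List (String × Int))) : Prop := out = str_grp_items_py_alt grp
instance (grp : List (List (String × Int))) (out : List (List (String × Int))) : Decidable (Spec_str_grp_items_py grp out) := by unfold Spec_str_grp_items_py; infer_instance

-- ===== CLAIM (what is proved, stated in full; the proofs are below) =====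
def Claim_equal_str_grp_items_py : Prop := ∀ (grp : List (List (String × Int))), Dom_str_grp_items_py grp → Pre_str_grp_items_py grp → Spec_str_grp_items_py grp (str_grp_items_py grp)

-- ===== LEMMAS AND PROOFS =====

-- the onset/dur of a freshly built item
lemma pvGetOnset_built (d : PySem.Dict String Int) (a b : Int) :
    pvGetOnset (PySem.Dict.insert (PySem.Dict.insert d "onset" a) "dur" b) = a := by
  unfold pvGetOnset
  rw [PySem.Dict.getD_insert, if_neg (by decide), PySem.Dict.getD_insert, if_pos rfl]

lemma pvGetDur_built (d : PySem.Dict String Int) (a b : Int) :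
    pvGetDur (PySem.Dict.insert (PySem.Dict.insert d "onset" a) "dur" b) = b := by
  unfold pvGetDur
  rw [PySem.Dict.getD_insert, if_pos rfl]

-- A's chained loop equals B's independent per-index construction: the accumulator's invariant is
-- pvGetOnset last + pvGetDur last = o0 + cps[i], and the chain telescopes.
lemma pvAux_eq (cps : List Int) (o0 : Int) :
    ∀ (rest acc : List (PySem.Dict String Int)) (last : PySem.Dict String Int) (i : Nat),
      i + 1 + rest.length ≤ cps.length →
      pvGetOnset last + pvGetDur last = o0 + cps.getD i 0 →
      pvAux cps rest (last :: acc) (i+1) =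
        (last :: acc).reverse ++
          ((cps.drop i).zip ((cps.drop (i+1)).zip rest)).map
            (fun p => PySem.Dict.insert (PySem.Dict.insert p.2.2 "onset" (o0 + p.1)) "dur" (p.2.1 - p.1)) := by
  intro rest
  induction rest with
  | nil => intro acc last i _ _; simp [pvAux]
  | cons item rest ih =>
      intro acc last i hlen hinv
      have hi : i < cps.length := by simp at hlen; omega
      have hi1 : i + 1 < cps.length := by simp at hlen; omega
      have hdi : cps.drop i = cps[i] :: cps.drop (i+1) := List.drop_eq_getElem_cons hi
      have hdi1 : cps.drop (i+1) = cps[i+1] :: cps.drop (i+2) := List.drop_eq_getElem_cons hi1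
      have hgd : cps.getD i 0 = cps[i] := List.getD_eq_getElem cps 0 hi
      have hgd1 : cps.getD (i+1) 0 = cps[i+1] := List.getD_eq_getElem cps 0 hi1
      show pvAux cps (item :: rest) (last :: acc) (i+1) = _
      rw [pvAux]
      simp only [List.headD_cons]
      have hstep : (i + 1) - 1 = i := by omega
      rw [hstep, hinv, hgd1, hgd]
      rw [ih (last :: acc) _ (i+1) (by simp at hlen ⊢; omega)
            (by rw [pvGetOnset_built, pvGetDur_built, hgd1]; ring)]
      have hz : (cps.drop i).zip ((cps.drop (i+1)).zip (item :: rest)) =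
          (cps[i], (cps[i+1], item)) :: ((cps.drop (i+1)).zip ((cps.drop (i+2)).zip rest)) := by
        rw [hdi, hdi1]; simp only [List.zip_cons_cons]
      rw [hz]
      simp [List.append_assoc]

theorem str_grp_items_py_spec' (grp : List (List (String × Int))) :
    str_grp_items_py grp = str_grp_items_py_alt grp := by
  unfold str_grp_items_py str_grp_items_py_alt
  cases hs : PySem.List.sorted (grp.map PySem.Dict.ofList) pvGetDur with
  | nil => simp
  | cons first rest =>
      cases rest with
      | nil => simp [pvAux]
      | cons r rs =>
          simp only [List.isEmpty_cons]
          have h := pvAux_eq ((first :: r :: rs).map pvGetDur) (pvGetOnset first)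
            (r :: rs) [] first 0 (by simp; omega) (by simp)
          simp only [List.drop_zero] at h
          rw [h]
          rw [PySem.List.slice_from_one]
          simp

-- ===== VERDICT (by name: the statement is the Claim_ definition above) =====
theorem str_grp_items_py_spec : Claim_equal_str_grp_items_py := by
  intro grp _ _
  unfold Spec_str_grp_items_py
  exact str_grp_items_py_spec' grp
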